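-- pv_equiv track=rewrite | github.com/TheBabu/USACO-Train-Problems | Chapter 1/Section 1.2/beads/beads.py | checknumofbeads
-- ===== SOURCE A (Python) =====
-- def checknumofbeads(beads, beadpos, leftchar, rightchar):
-- 	numofbeads = 0
--
-- 	#Left Check
-- 	leftshift = -1
-- 	while(beads[(beadpos + leftshift) % len(beads)] in (leftchar, 'w') and numofbeads < len(beads)):
-- 		numofbeads += 1
-- 		leftshift -= 1
--
-- 	#Right Check
-- 	rightshift = 0
-- 	while(beads[(beadpos + rightshift) % len(beads)] in (rightchar, 'w') and numofbeads < len(beads)):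
-- 		numofbeads += 1
-- 		rightshift += 1
-- 	return numofbeads
-- ===== SOURCE B (Python) =====
-- def checknumofbeads(beads, beadpos, leftchar, rightchar):
--     n = len(beads)
--     p = beadpos % n
--     forward = beads[p:] + beads[:p]
--     right = next((i for i, b in enumerate(forward) if b not in (rightchar, 'w')), n)
--     left = next((i for i, b in enumerate(reversed(forward)) if b not in (leftchar, 'w')), n)
--     return min(left + right, n)
-- ===== Notes on version B (the rewrite author's own statement) =====
-- stated objective: alternative
-- what changed: Instead of A's two while-loops walking a shared counter over modular indices, B materialises the rotation beads[p:]+beads[:p] once and reads off the index of the first mismatching bead in that list and in its reversal, returning min(left + right, n).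
import Mathlib
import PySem

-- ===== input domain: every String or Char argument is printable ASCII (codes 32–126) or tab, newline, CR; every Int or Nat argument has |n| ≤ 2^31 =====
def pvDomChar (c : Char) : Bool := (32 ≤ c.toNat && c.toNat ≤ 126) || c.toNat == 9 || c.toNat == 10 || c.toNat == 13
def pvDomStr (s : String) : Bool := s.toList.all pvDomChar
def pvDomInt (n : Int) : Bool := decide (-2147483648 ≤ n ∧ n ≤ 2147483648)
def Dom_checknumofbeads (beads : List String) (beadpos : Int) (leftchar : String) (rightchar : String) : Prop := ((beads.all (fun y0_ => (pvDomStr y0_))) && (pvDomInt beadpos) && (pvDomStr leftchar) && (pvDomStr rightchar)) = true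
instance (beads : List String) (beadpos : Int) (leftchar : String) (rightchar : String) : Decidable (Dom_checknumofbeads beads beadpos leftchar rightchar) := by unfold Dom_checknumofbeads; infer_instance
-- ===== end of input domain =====

-- B replaces A's two modular-index while-loops sharing one counter by materialising the
-- rotation beads[p:]+beads[:p] once and taking the index of the first mismatch in it and in
-- its reversal, combined as min(left + right, n) (objective: alternative).

-- ===== PORT A =====
-- beads[(i) % len(beads)]  (Python modulo; always in range when beads ≠ [], so getD is never hit there)
def pvBeadAt (beads : List String) (i : Int) : String :=
  (PySem.List.pyGet? beads (PySem.Int.mod i (beads.length : Int))).getD ""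

-- A's first while loop: guard 'beads[(beadpos+leftshift) % n] in (leftchar,"w") and numofbeads < n'
def pvALeft (beads : List String) (beadpos : Int) (leftchar : String)
    (numofbeads leftshift : Int) : Int :=
  if h : (pvBeadAt beads (beadpos + leftshift) = leftchar ∨ pvBeadAt beads (beadpos + leftshift) = "w")
         ∧ numofbeads < (beads.length : Int) then
    pvALeft beads beadpos leftchar (numofbeads + 1) (leftshift - 1)
  else numofbeads
termination_by ((beads.length : Int) - numofbeads).toNat
decreasing_by obtain ⟨-, h2⟩ := h; omega

-- A's second while loop, continuing with the same counter
def pvARight (beads : List String) (beadpos : Int) (rightchar : String)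
    (numofbeads rightshift : Int) : Int :=
  if h : (pvBeadAt beads (beadpos + rightshift) = rightchar ∨ pvBeadAt beads (beadpos + rightshift) = "w")
         ∧ numofbeads < (beads.length : Int) then
    pvARight beads beadpos rightchar (numofbeads + 1) (rightshift + 1)
  else numofbeads
termination_by ((beads.length : Int) - numofbeads).toNat
decreasing_by obtain ⟨-, h2⟩ := h; omega

def checknumofbeads (beads : List String) (beadpos : Int) (leftchar : String) (rightchar : String) : Int :=
  let numofbeads := pvALeft beads beadpos leftchar 0 (-1)
  pvARight beads beadpos rightchar numofbeads 0

-- ===== PORT B =====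
-- next((i for i, b in enumerate(L) if b not in (c, 'w')), default): index of the first mismatch
def pvFirstMismatch (L : List String) (c : String) : Int :=
  match L.findIdx? (fun b => !(b == c || b == "w")) with
  | some i => (i : Int)
  | none => (L.length : Int)

-- p = beadpos % len(beads); forward = beads[p:] + beads[:p]
def pvRotate (beads : List String) (beadpos : Int) : List String :=
  let p := PySem.Int.mod beadpos (beads.length : Int)
  PySem.List.slice beads (some p) none ++ PySem.List.slice beads none (some p)

def checknumofbeads_alt (beads : List String) (beadpos : Int) (leftchar : String) (rightchar : String) : Int :=
  let forward := pvRotate beads beadpos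
  let right := pvFirstMismatch forward rightchar
  let left := pvFirstMismatch forward.reverse leftchar
  min (left + right) (beads.length : Int)

-- ===== PRECONDITION & SPEC =====
-- Pre_ excludes only the empty list, on which Python A raises ZeroDivisionError ('% len(beads)').
def Pre_checknumofbeads (beads : List String) (beadpos : Int) (leftchar : String) (rightchar : String) : Prop :=
  beads ≠ []
instance (beads : List String) (beadpos : Int) (leftchar : String) (rightchar : String) : Decidable (Pre_checknumofbeads beads beadpos leftchar rightchar) := by unfold Pre_checknumofbeads; infer_instance

def pvWitness_checknumofbeads : List String × Int × String × String := (["r", "w", "b"], 1, "r", "b")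

def Spec_checknumofbeads (beads : List String) (beadpos : Int) (leftchar : String) (rightchar : String) (out : Int) : Prop := out = checknumofbeads_alt beads beadpos leftchar rightchar
instance (beads : List String) (beadpos : Int) (leftchar : String) (rightchar : String) (out : Int) : Decidable (Spec_checknumofbeads beads beadpos leftchar rightchar out) := by unfold Spec_checknumofbeads; infer_instance

-- ===== CLAIM (what is proved, stated in full; the proofs are below) =====
def Claim_equal_checknumofbeads : Prop := ∀ (beads : List String) (beadpos : Int) (leftchar : String) (rightchar : String), Dom_checknumofbeads beads beadpos leftchar rightchar → Pre_checknumofbeads beads beadpos leftchar rightchar → Spec_checknumofbeads beads beadpos leftchar rightchar (checknumofbeads beads beadpos leftchar rightchar)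

-- ===== LEMMAS AND PROOFS =====

-- Proof-side abstraction of both of A's loops: a single capped directional scan.
def pvStreak (beads : List String) (beadpos : Int) (shift step : Int) (c : String)
    (count : Int) : Int :=
  if h : count < (beads.length : Int)
         ∧ (pvBeadAt beads (beadpos + shift) = c ∨ pvBeadAt beads (beadpos + shift) = "w") then
    pvStreak beads beadpos (shift + step) step c (count + 1)
  else count
termination_by ((beads.length : Int) - count).toNat
decreasing_by obtain ⟨h1, -⟩ := h; omega


theorem pvALeft_eq_streak (beads : List String) (beadpos : Int) (c : String) :
    ∀ num shift : Int, pvALeft beads beadpos c num shift = pvStreak beads beadpos shift (-1) c num := by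
  intro num shift
  fun_induction pvALeft beads beadpos c num shift with
  | case1 num shift h ih =>
      rw [pvStreak]
      rw [dif_pos ⟨h.2, h.1⟩]
      simpa using ih
  | case2 num shift h =>
      rw [pvStreak, dif_neg (by tauto)]

theorem pvARight_eq_streak (beads : List String) (beadpos : Int) (c : String) :
    ∀ num shift : Int, pvARight beads beadpos c num shift = pvStreak beads beadpos shift 1 c num := by
  intro num shift
  fun_induction pvARight beads beadpos c num shift with
  | case1 num shift h ih =>
      rw [pvStreak]
      rw [dif_pos ⟨h.2, h.1⟩]
      exact ih
  | case2 num shift h =>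
      rw [pvStreak, dif_neg (by tauto)]

theorem pvStreak_ge (beads : List String) (beadpos : Int) (step : Int) (c : String) :
    ∀ shift count : Int, count ≤ pvStreak beads beadpos shift step c count := by
  intro shift count
  fun_induction pvStreak beads beadpos shift step c count with
  | case1 shift count h ih => omega
  | case2 shift count h => exact le_refl _

theorem pvStreak_le (beads : List String) (beadpos : Int) (step : Int) (c : String) :
    ∀ shift count : Int, count ≤ (beads.length : Int) →
      pvStreak beads beadpos shift step c count ≤ (beads.length : Int) := by
  intro shift count
  fun_induction pvStreak beads beadpos shift step c count with
  | case1 shift count h ih => intro _; exact ih (by omega)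
  | case2 shift count h => intro hle; simpa [pvStreak, dif_neg h] using hle

-- The counter offset factors out: running the streak from a larger start just shifts and re-caps it.
theorem pvStreak_shift (beads : List String) (beadpos : Int) (step : Int) (c : String) :
    ∀ fuel : Nat, ∀ shift num₁ num₂ : Int,
      0 ≤ num₁ → num₁ ≤ num₂ → num₂ ≤ (beads.length : Int) →
      fuel = ((beads.length : Int) - num₂).toNat →
      pvStreak beads beadpos shift step c num₂ =
        min (num₂ + (pvStreak beads beadpos shift step c num₁ - num₁)) (beads.length : Int) := by
  intro fuel
  induction fuel with
  | zero =>
      intro shift num₁ num₂ h0 h12 h2n hf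
      have hnum : num₂ = (beads.length : Int) := by omega
      rw [pvStreak, dif_neg (by omega)]
      have := pvStreak_ge beads beadpos step c shift num₁
      omega
  | succ k ih =>
      intro shift num₁ num₂ h0 h12 h2n hf
      by_cases hm : pvBeadAt beads (beadpos + shift) = c ∨ pvBeadAt beads (beadpos + shift) = "w"
      · by_cases hlt : num₂ < (beads.length : Int)
        · have h1lt : num₁ < (beads.length : Int) := by omega
          rw [pvStreak, dif_pos ⟨hlt, hm⟩]
          conv_rhs => rw [pvStreak, dif_pos ⟨h1lt, hm⟩]
          rw [ih (shift + step) (num₁ + 1) (num₂ + 1) (by omega) (by omega) (by omega) (by omega)]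
          omega
        · rw [pvStreak, dif_neg (by omega)]
          have := pvStreak_ge beads beadpos step c shift num₁
          have := pvStreak_le beads beadpos step c shift num₁ (by omega)
          omega
      · rw [pvStreak, dif_neg (by tauto)]
        conv_rhs => rw [pvStreak, dif_neg (by tauto)]
        omega

-- index of the first mismatch = length of the matching prefix
theorem pvFindIdx_takeWhile {α : Type} (p : α → Bool) (L : List α) :
    (match L.findIdx? (fun b => !p b) with
     | some i => (i : Int)
     | none => (L.length : Int)) = ((L.takeWhile p).length : Int) := by
  induction L with
  | nil => rfl
  | cons x xs ih =>
      cases hp : p x with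
      | true =>
          simp only [List.findIdx?_cons, hp, Bool.not_true, List.takeWhile_cons, if_true,
            Bool.false_eq_true, if_false]
          cases hfi : xs.findIdx? (fun b => !p b) with
          | none => simp [hfi] at ih ⊢; omega
          | some i => simp [hfi] at ih ⊢; omega
      | false =>
          simp [List.findIdx?_cons, hp]

theorem pvFirstMismatch_eq_takeWhile (L : List String) (c : String) :
    pvFirstMismatch L c = ((L.takeWhile (fun b => b == c || b == "w")).length : Int) := by
  have := pvFindIdx_takeWhile (fun b => b == c || b == "w") L
  simpa [pvFirstMismatch] using this

theorem pvRotate_length (beads : List String) (beadpos : Int) (h : beads ≠ []) :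
    (pvRotate beads beadpos).length = beads.length := by
  have hn : 0 < (beads.length : Int) := by
    have := List.length_pos_iff.mpr h; omega
  have h0 : 0 ≤ PySem.Int.mod beadpos (beads.length : Int) := PySem.Int.mod_nonneg _ hn
  have hlt : PySem.Int.mod beadpos (beads.length : Int) < (beads.length : Int) := PySem.Int.mod_lt _ hn
  simp [pvRotate, PySem.List.slice_from _ h0, PySem.List.slice_to _ h0]
  omega

theorem pvRotate_getD (beads : List String) (beadpos : Int) (h : beads ≠ []) (j : Nat)
    (hj : j < beads.length) :
    (pvRotate beads beadpos).getD j "" =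
      beads.getD (((PySem.Int.mod beadpos (beads.length : Int)).toNat + j) % beads.length) "" := by
  have hn : 0 < (beads.length : Int) := by
    have := List.length_pos_iff.mpr h; omega
  have h0 : 0 ≤ PySem.Int.mod beadpos (beads.length : Int) := PySem.Int.mod_nonneg _ hn
  have hlt : PySem.Int.mod beadpos (beads.length : Int) < (beads.length : Int) := PySem.Int.mod_lt _ hn
  have hplt : (PySem.Int.mod beadpos (beads.length : Int)).toNat < beads.length := by omega
  set p := (PySem.Int.mod beadpos (beads.length : Int)).toNat with hp
  simp only [pvRotate, PySem.List.slice_from _ h0, PySem.List.slice_to _ h0, ← hp]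
  rcases lt_or_ge j (beads.length - p) with hcase | hcase
  · rw [Nat.mod_eq_of_lt (by omega)]
    rw [List.getD_eq_getElem?_getD, List.getElem?_append_left (by simp only [List.length_drop]; omega),
        List.getElem?_drop, ← List.getD_eq_getElem?_getD]
  · rw [List.getD_eq_getElem?_getD, List.getElem?_append_right (by simp only [List.length_drop]; omega)]
    simp only [List.length_drop]
    rw [List.getElem?_take_of_lt (by omega), ← List.getD_eq_getElem?_getD]
    congr 1
    have he : p + j = (j - (beads.length - p)) + 1 * beads.length := by omega
    rw [he, Nat.add_mul_mod_self_right, Nat.mod_eq_of_lt (by omega)]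

theorem pvBeadAt_eq_getD (beads : List String) (i : Int) (h : beads ≠ []) :
    pvBeadAt beads i = beads.getD (PySem.Int.mod i (beads.length : Int)).toNat "" := by
  have hn : 0 < (beads.length : Int) := by have := List.length_pos_iff.mpr h; omega
  have h0 := PySem.Int.mod_nonneg i hn
  have hlt := PySem.Int.mod_lt i hn
  rw [pvBeadAt, PySem.List.pyGet?_of_nonneg _ h0, List.getD_eq_getElem?_getD]

theorem pvMod_add_nat (beads : List String) (beadpos : Int) (h : beads ≠ []) (k : Nat) :
    (PySem.Int.mod (beadpos + (k : Int)) (beads.length : Int)).toNat =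
      ((PySem.Int.mod beadpos (beads.length : Int)).toNat + k) % beads.length := by
  have hn : 0 < (beads.length : Int) := by have := List.length_pos_iff.mpr h; omega
  rw [PySem.Int.mod_eq_emod_of_pos hn, PySem.Int.mod_eq_emod_of_pos hn]
  have h0 : 0 ≤ beadpos % (beads.length : Int) := Int.emod_nonneg _ (by omega)
  have key : (beadpos + (k : Int)) % (beads.length : Int)
      = (beadpos % (beads.length : Int) + (k : Int)) % (beads.length : Int) := by
    conv_lhs => rw [← Int.emod_add_mul_ediv beadpos (beads.length : Int)]
    rw [add_right_comm, Int.add_mul_emod_self_left]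
  have hcast : beadpos % (beads.length : Int) + (k : Int)
      = (((beadpos % (beads.length : Int)).toNat + k : Nat) : Int) := by
    push_cast [Int.toNat_of_nonneg h0]
    ring
  rw [key, hcast, ← Int.natCast_emod]
  exact Int.toNat_natCast _

theorem pvMod_left (beads : List String) (beadpos : Int) (h : beads ≠ []) (j : Nat)
    (hj : j < beads.length) :
    (PySem.Int.mod (beadpos + (-1 - (j : Int))) (beads.length : Int)).toNat =
      ((PySem.Int.mod beadpos (beads.length : Int)).toNat + (beads.length - 1 - j)) % beads.length := by
  have hn : 0 < (beads.length : Int) := by have := List.length_pos_iff.mpr h; omega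
  have hc : ((beads.length - 1 - j : Nat) : Int) = (beads.length : Int) - 1 - (j : Int) := by omega
  have hshift : beadpos + (-1 - (j : Int))
      = (beadpos + ((beads.length - 1 - j : Nat) : Int)) + (-1) * (beads.length : Int) := by
    rw [hc]; ring
  rw [hshift]
  have hdrop : PySem.Int.mod ((beadpos + ((beads.length - 1 - j : Nat) : Int)) + (-1) * (beads.length : Int)) (beads.length : Int)
      = PySem.Int.mod (beadpos + ((beads.length - 1 - j : Nat) : Int)) (beads.length : Int) := by
    rw [PySem.Int.mod_eq_emod_of_pos hn, PySem.Int.mod_eq_emod_of_pos hn, mul_comm,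
        Int.add_mul_emod_self_left]
  rw [hdrop, pvMod_add_nat beads beadpos h (beads.length - 1 - j)]

theorem pvStreak_right (beads : List String) (beadpos : Int) (c : String) (h : beads ≠ []) :
    ∀ fuel j : Nat, j ≤ beads.length → fuel = beads.length - j →
      pvStreak beads beadpos (j : Int) 1 c (j : Int) =
        (j : Int) + ((((pvRotate beads beadpos).drop j).takeWhile (fun b => b == c || b == "w")).length : Int) := by
  intro fuel
  induction fuel with
  | zero =>
      intro j hjle hf
      have hj : j = beads.length := by omega
      rw [pvStreak, dif_neg (by rintro ⟨hlt, -⟩; omega)]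
      have hnil : (pvRotate beads beadpos).drop j = [] :=
        List.drop_eq_nil_of_le (by rw [pvRotate_length _ _ h]; omega)
      simp [hnil]
  | succ f ih =>
      intro j hjle hf
      have hjlt : j < beads.length := by omega
      have haccess : pvBeadAt beads (beadpos + (j : Int)) = (pvRotate beads beadpos).getD j "" := by
        rw [pvBeadAt_eq_getD _ _ h, pvMod_add_nat _ _ h j, pvRotate_getD _ _ h j hjlt]
      have hdrop : (pvRotate beads beadpos).drop j
          = (pvRotate beads beadpos).getD j "" :: (pvRotate beads beadpos).drop (j+1) := by
        rw [List.getD_eq_getElem _ _ (by rw [pvRotate_length _ _ h]; omega)]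
        exact List.drop_eq_getElem_cons (by rw [pvRotate_length _ _ h]; omega)
      rw [pvStreak]
      by_cases hm : pvBeadAt beads (beadpos + (j : Int)) = c ∨ pvBeadAt beads (beadpos + (j : Int)) = "w"
      · rw [dif_pos ⟨by exact_mod_cast Int.ofNat_lt.mpr hjlt, hm⟩]
        have hstep : ((j : Int) + 1) = (((j+1 : Nat)) : Int) := by push_cast; ring
        rw [hstep, ih (j+1) (by omega) (by omega), hdrop, List.takeWhile_cons]
        have hpred : ((pvRotate beads beadpos).getD j "" == c || (pvRotate beads beadpos).getD j "" == "w") = true := by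
          rw [← haccess]
          rcases hm with hm | hm <;> simp [hm]
        rw [hpred, if_pos rfl]
        simp only [List.length_cons]
        push_cast
        ring
      · rw [dif_neg (by rintro ⟨-, hb⟩; exact hm hb)]
        rw [hdrop, List.takeWhile_cons]
        have hpred : ((pvRotate beads beadpos).getD j "" == c || (pvRotate beads beadpos).getD j "" == "w") = false := by
          rw [← haccess]
          simp only [not_or] at hm
          simp [hm.1, hm.2]
        rw [hpred]
        simp

theorem pvStreak_left (beads : List String) (beadpos : Int) (c : String) (h : beads ≠ []) :
    ∀ fuel j : Nat, j ≤ beads.length → fuel = beads.length - j →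
      pvStreak beads beadpos (-1 - (j : Int)) (-1) c (j : Int) =
        (j : Int) + ((((pvRotate beads beadpos).reverse.drop j).takeWhile (fun b => b == c || b == "w")).length : Int) := by
  intro fuel
  induction fuel with
  | zero =>
      intro j hjle hf
      have hj : j = beads.length := by omega
      rw [pvStreak, dif_neg (by rintro ⟨hlt, -⟩; omega)]
      have hnil : (pvRotate beads beadpos).reverse.drop j = [] :=
        List.drop_eq_nil_of_le (by rw [List.length_reverse, pvRotate_length _ _ h]; omega)
      simp [hnil]
  | succ f ih =>
      intro j hjle hf
      have hjlt : j < beads.length := by omega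
      have hrl : (pvRotate beads beadpos).reverse.length = beads.length := by
        rw [List.length_reverse, pvRotate_length _ _ h]
      have hrev : (pvRotate beads beadpos).reverse.getD j "" = (pvRotate beads beadpos).getD ((pvRotate beads beadpos).length - 1 - j) "" := by
        have hb : j < (pvRotate beads beadpos).reverse.length := by rw [hrl]; omega
        have hb2 : (pvRotate beads beadpos).length - 1 - j < (pvRotate beads beadpos).length := by
          rw [pvRotate_length _ _ h]; omega
        rw [List.getD_eq_getElem _ _ hb, List.getElem_reverse, ← List.getD_eq_getElem _ _ hb2]
      have haccess : pvBeadAt beads (beadpos + (-1 - (j : Int))) = (pvRotate beads beadpos).reverse.getD j "" := by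
        rw [pvBeadAt_eq_getD _ _ h, pvMod_left _ _ h j hjlt, hrev, pvRotate_length _ _ h,
            pvRotate_getD _ _ h (beads.length - 1 - j) (by omega)]
      have hdrop : (pvRotate beads beadpos).reverse.drop j
          = (pvRotate beads beadpos).reverse.getD j "" :: (pvRotate beads beadpos).reverse.drop (j+1) := by
        rw [List.getD_eq_getElem _ _ (by rw [hrl]; omega)]
        exact List.drop_eq_getElem_cons (by rw [hrl]; omega)
      rw [pvStreak]
      by_cases hm : pvBeadAt beads (beadpos + (-1 - (j : Int))) = c ∨ pvBeadAt beads (beadpos + (-1 - (j : Int))) = "w"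
      · rw [dif_pos ⟨by exact_mod_cast Int.ofNat_lt.mpr hjlt, hm⟩]
        have hstep1 : (-1 - (j : Int) + -1) = (-1 - (((j+1 : Nat)) : Int)) := by push_cast; ring
        have hstep2 : ((j : Int) + 1) = (((j+1 : Nat)) : Int) := by push_cast; ring
        rw [hstep1, hstep2, ih (j+1) (by omega) (by omega), hdrop, List.takeWhile_cons]
        have hpred : ((pvRotate beads beadpos).reverse.getD j "" == c || (pvRotate beads beadpos).reverse.getD j "" == "w") = true := by
          rw [← haccess]
          rcases hm with hm | hm <;> simp [hm]
        rw [hpred, if_pos rfl]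
        simp only [List.length_cons]
        push_cast
        ring
      · rw [dif_neg (by rintro ⟨-, hb⟩; exact hm hb)]
        rw [hdrop, List.takeWhile_cons]
        have hpred : ((pvRotate beads beadpos).reverse.getD j "" == c || (pvRotate beads beadpos).reverse.getD j "" == "w") = false := by
          rw [← haccess]
          simp only [not_or] at hm
          simp [hm.1, hm.2]
        rw [hpred]
        simp

-- ===== VERDICT (by name: the statement is the Claim_ definition above) =====
theorem checknumofbeads_spec : Claim_equal_checknumofbeads := by
  intro beads beadpos leftchar rightchar _ hpre
  unfold Spec_checknumofbeads checknumofbeads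
  rw [pvALeft_eq_streak, pvARight_eq_streak]
  have hB : checknumofbeads_alt beads beadpos leftchar rightchar
      = min (pvFirstMismatch (pvRotate beads beadpos).reverse leftchar
             + pvFirstMismatch (pvRotate beads beadpos) rightchar) (beads.length : Int) := rfl
  have hL0 : pvStreak beads beadpos (-1) (-1) leftchar 0
      = pvFirstMismatch (pvRotate beads beadpos).reverse leftchar := by
    have h := pvStreak_left beads beadpos leftchar hpre beads.length 0 (by omega) (by omega)
    rw [pvFirstMismatch_eq_takeWhile]
    simpa using h
  have hR0 : pvStreak beads beadpos 0 1 rightchar 0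
      = pvFirstMismatch (pvRotate beads beadpos) rightchar := by
    have h := pvStreak_right beads beadpos rightchar hpre beads.length 0 (by omega) (by omega)
    rw [pvFirstMismatch_eq_takeWhile]
    simpa using h
  have h0 : (0:Int) ≤ pvStreak beads beadpos (-1) (-1) leftchar 0 :=
    pvStreak_ge beads beadpos (-1) leftchar (-1) 0
  have hn : pvStreak beads beadpos (-1) (-1) leftchar 0 ≤ (beads.length : Int) :=
    pvStreak_le beads beadpos (-1) leftchar (-1) 0 (by positivity)
  rw [pvStreak_shift beads beadpos 1 rightchar
        ((beads.length : Int) - pvStreak beads beadpos (-1) (-1) leftchar 0).toNat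
        0 0 (pvStreak beads beadpos (-1) (-1) leftchar 0) le_rfl h0 hn rfl]
  rw [hB, ← hL0, ← hR0]
  omega
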